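-- pv_equiv track=rewrite | github.com/OE4T/meta-tegra | recipes-bsp/tegra-binaries/tegra-helper-scripts/brcid-to-uid.py | recode_lot0
-- ===== SOURCE A (Python) =====
-- def recode_lot0(reg):
--     """
--     Converts the 5-digit (6 bits per digit) base-36 lot code to binary.
--     """
--     reg <<= 2;
--     lot = 0
--     for i in range(0, 5):
--         digit = (reg & 0xfc000000) >> 26
--         lot *= 36
--         lot += digit
--         reg <<= 6
--     return lot
-- ===== SOURCE B (Python) =====
-- def recode_lot0(reg):
--     # Positional decode: digit j (weight 36**j) sits at bits 6j..6j+5 of the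
--     # unshifted register; no mutation of reg, no Horner accumulation.
--     return sum(((reg >> (6 * j)) & 0x3F) * 36 ** j for j in range(5))
-- ===== Notes on version B (the rewrite author's own statement) =====
-- stated objective: simpler
-- what changed: Replaces the MSB-first Horner multiply-accumulate over a rolling left-shifted register with a one-line LSB-first positional sum that reads each 6-bit digit at its fixed offset and weights it by 36**j.
import Mathlib
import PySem

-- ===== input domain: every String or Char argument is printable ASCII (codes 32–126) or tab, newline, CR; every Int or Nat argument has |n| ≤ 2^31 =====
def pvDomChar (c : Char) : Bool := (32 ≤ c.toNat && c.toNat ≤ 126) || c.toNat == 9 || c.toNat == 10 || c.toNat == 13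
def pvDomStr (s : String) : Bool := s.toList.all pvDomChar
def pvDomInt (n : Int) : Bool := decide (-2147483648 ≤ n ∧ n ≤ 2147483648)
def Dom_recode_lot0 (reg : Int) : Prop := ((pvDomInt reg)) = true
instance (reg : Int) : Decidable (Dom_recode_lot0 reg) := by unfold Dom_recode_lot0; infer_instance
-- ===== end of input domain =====

-- B replaces A's Horner multiply-accumulate over a rolling shifted register by a
-- positional sum of fixed-offset 6-bit digits weighted by powers of 36 (objective: simpler).

-- ===== PORT A =====
-- `x << k` on Python ints is exactly `x * 2^k`; `(x & 0xfc000000) >> 26` keeps bits 26..31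
-- of x's two's-complement value and shifts them down, which is exactly
-- `(x % 2^32) / 2^26` with Int.emod/Int.ediv (Python's `%`/`//` by a positive power of two).
def recode_lot0 (reg : Int) : Int :=
  let reg := reg * 4  -- reg <<= 2
  let st := (PySem.List.pyRange 0 5 1).foldl
    (fun (st : Int × Int) _ =>
      let reg := st.1
      let lot := st.2
      let digit := (reg % 4294967296) / 67108864  -- (reg & 0xfc000000) >> 26
      (reg * 64, lot * 36 + digit))               -- lot *= 36; lot += digit; reg <<= 6
    (reg, 0)
  st.2

-- ===== PORT B =====
-- `(reg >> (6*j)) & 0x3f` on Python ints is exactly `(reg / 2^(6*j)) % 64`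
-- (arithmetic right shift = floor division; mask by 0x3f = floor mod 64).
def recode_lot0_alt (reg : Int) : Int :=
  ((PySem.List.pyRange 0 5 1).map
    (fun j => ((reg / (2 : Int) ^ (6 * j).toNat) % 64) * 36 ^ j.toNat)).sum

-- ===== PRECONDITION & SPEC =====
def Spec_recode_lot0 (reg : Int) (out : Int) : Prop := out = recode_lot0_alt reg
instance (reg : Int) (out : Int) : Decidable (Spec_recode_lot0 reg out) := by unfold Spec_recode_lot0; infer_instance

-- ===== CLAIM (what is proved, stated in full; the proofs are below) =====
def Claim_equal_recode_lot0 : Prop := ∀ (reg : Int), Dom_recode_lot0 reg → Spec_recode_lot0 reg (recode_lot0 reg)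

-- ===== LEMMAS AND PROOFS =====

-- ===== VERDICT (by name: the statement is the Claim_ definition above) =====
theorem recode_lot0_spec : Claim_equal_recode_lot0 := by
  intro reg _
  unfold Spec_recode_lot0 recode_lot0 recode_lot0_alt
  simp [PySem.List.pyRange, List.range_succ]
  omega
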